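-- pv_equiv track=rewrite | github.com/qn06142/coding-python | lqdojcontest9bai1.py | preprocess_special_numbers
-- ===== SOURCE A (Python) =====
-- def calculate_divisor_sums(limit):
--     divisor_sum = [0] * (limit + 1)
--     for i in range(1, limit + 1):
--         for j in range(2 * i, limit + 1, i):
--             divisor_sum[j] += i
--     return divisor_sum
--
-- def preprocess_special_numbers(limit, max_x):
--     divisor_sum = calculate_divisor_sums(limit)
--     special_count = [[0] * (max_x + 1) for _ in range(limit + 1)]
--
--     for x in range(1, max_x + 1):
--         count = 0
--         for n in range(1, limit + 1):
--             if divisor_sum[n] > x: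
--                 count += 1
--             special_count[n][x] = count
--
--     return special_count, divisor_sum
-- ===== SOURCE B (Python) =====
-- def preprocess_special_numbers(limit, max_x):
--     # same divisor-sum sieve
--     divisor_sum = [0] * (limit + 1)
--     for i in range(1, limit + 1):
--         for j in range(2 * i, limit + 1, i):
--             divisor_sum[j] += i
--
--     # build the table row by row: row n is row n-1 with columns
--     # 1 <= x < t incremented (exactly the x with divisor_sum[n] > x)
--     rows = []
--     row = [0] * (max_x + 1)
--     for n in range(limit + 1):
--         if n > 0:
--             t = max(1, min(divisor_sum[n], max_x + 1))
--             row = row[:1] + [v + 1 for v in row[1:t]] + row[t:]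
--         rows.append(row)
--     return rows, divisor_sum
-- ===== Notes on version B (the rewrite author's own statement) =====
-- stated objective: alternative
-- what changed: B keeps the divisor-sum sieve but builds the table row by row, deriving each row from the previous one by slice-concatenation (incrementing the columns x with divisor_sum[n] > x), instead of A's column-by-column sweep with a scalar running count mutating a preallocated 2-D table.
import Mathlib
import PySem

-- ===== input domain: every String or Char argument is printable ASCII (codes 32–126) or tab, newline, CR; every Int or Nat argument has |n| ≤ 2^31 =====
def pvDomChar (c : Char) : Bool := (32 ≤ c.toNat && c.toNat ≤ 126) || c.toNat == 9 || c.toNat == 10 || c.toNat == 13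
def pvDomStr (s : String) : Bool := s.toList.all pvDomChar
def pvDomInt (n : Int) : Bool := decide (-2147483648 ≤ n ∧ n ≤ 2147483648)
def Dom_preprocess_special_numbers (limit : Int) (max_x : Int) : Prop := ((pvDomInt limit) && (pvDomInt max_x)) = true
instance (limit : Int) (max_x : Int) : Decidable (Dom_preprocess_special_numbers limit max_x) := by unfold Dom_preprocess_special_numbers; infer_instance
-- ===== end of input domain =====

-- B differs from A by building the table row by row (each row derived from the previous
-- one by slice-concatenation) instead of A's column-wise sweep with a scalar running count;
-- objective: alternative decomposition, same complexity.

-- ===== PORT A =====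
-- helper: the divisor-sum sieve (exact port; all indices j are nonnegative and in range)
def calculate_divisor_sums (limit : Int) : List Int :=
  let divisor_sum := List.replicate (limit + 1).toNat (0 : Int)
  (PySem.List.pyRange 1 (limit + 1) 1).foldl (fun ds i =>
    (PySem.List.pyRange (2 * i) (limit + 1) i).foldl (fun ds j =>
      PySem.List.pySetD ds j (PySem.List.pyGetD ds j 0 + i)) ds) divisor_sum

def preprocess_special_numbers (limit : Int) (max_x : Int) : List (List Int) × List Int :=
  let divisor_sum := calculate_divisor_sums limit
  let special_count := List.replicate (limit + 1).toNat (List.replicate (max_x + 1).toNat (0 : Int))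
  let special_count := (PySem.List.pyRange 1 (max_x + 1) 1).foldl (fun sc x =>
    ((PySem.List.pyRange 1 (limit + 1) 1).foldl (fun (st : Int × List (List Int)) n =>
        let count := if PySem.List.pyGetD divisor_sum n 0 > x then st.1 + 1 else st.1
        (count, PySem.List.pySetD st.2 n
          (PySem.List.pySetD (PySem.List.pyGetD st.2 n []) x count)))
      ((0 : Int), sc)).2) special_count
  (special_count, divisor_sum)

-- ===== PORT B =====
def preprocess_special_numbers_alt (limit : Int) (max_x : Int) : List (List Int) × List Int :=
  -- same divisor-sum sieve, inlined as in Source B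
  let divisor_sum :=
    let ds0 := List.replicate (limit + 1).toNat (0 : Int)
    (PySem.List.pyRange 1 (limit + 1) 1).foldl (fun ds i =>
      (PySem.List.pyRange (2 * i) (limit + 1) i).foldl (fun ds j =>
        PySem.List.pySetD ds j (PySem.List.pyGetD ds j 0 + i)) ds) ds0
  -- row-by-row construction: state = (rows, current row)
  let st := (PySem.List.pyRange 0 (limit + 1) 1).foldl
    (fun (st : List (List Int) × List Int) n =>
      let row := if n > 0 then
          let t := max 1 (min (PySem.List.pyGetD divisor_sum n 0) (max_x + 1))
          PySem.List.slice st.2 none (some 1)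
            ++ (PySem.List.slice st.2 (some 1) (some t)).map (· + 1)
            ++ PySem.List.slice st.2 (some t) none
        else st.2
      (st.1 ++ [row], row))
    (([] : List (List Int)), List.replicate (max_x + 1).toNat (0 : Int))
  (st.1, divisor_sum)

-- ===== PRECONDITION & SPEC =====
def Spec_preprocess_special_numbers (limit : Int) (max_x : Int) (out : List (List Int) × List Int) : Prop := out = preprocess_special_numbers_alt limit max_x
instance (limit : Int) (max_x : Int) (out : List (List Int) × List Int) : Decidable (Spec_preprocess_special_numbers limit max_x out) := by unfold Spec_preprocess_special_numbers; infer_instance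

-- ===== CLAIM (what is proved, stated in full; the proofs are below) =====
def Claim_equal_preprocess_special_numbers : Prop := ∀ (limit : Int) (max_x : Int), Dom_preprocess_special_numbers limit max_x → Spec_preprocess_special_numbers limit max_x (preprocess_special_numbers limit max_x)

-- ===== LEMMAS AND PROOFS =====

-- number of m in 1..n with ds[m] > x (index via getD, default 0, matching pyGetD on nonneg indices)
def pvCnt (ds : List Int) (n : ℕ) (x : Int) : Int :=
  ((List.range n).countP (fun m => decide (x < ds.getD (m + 1) 0)) : ℕ)

-- the row of the finished table for n (columns 0..max_x)
def pvRow (ds : List Int) (max_x : Int) (n : ℕ) : List Int :=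
  (List.range (max_x + 1).toNat).map (fun (c : ℕ) => if 1 ≤ c then pvCnt ds n (c : Int) else 0)

def pvTblSpec (ds : List Int) (limit max_x : Int) : List (List Int) :=
  (List.range (limit + 1).toNat).map (pvRow ds max_x)

-- A-side intermediate table: columns < x finished, column x finished for rows ≤ n0
def pvEntry (ds : List Int) (x : Int) (n0 : ℕ) (n c : ℕ) : Int :=
  if 1 ≤ n ∧ 1 ≤ c ∧ ((c : Int) < x ∨ ((c : Int) = x ∧ n ≤ n0)) then pvCnt ds n (c : Int) else 0

def pvTblP (ds : List Int) (limit max_x x : Int) (n0 : ℕ) : List (List Int) :=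
  (List.range (limit + 1).toNat).map (fun n => (List.range (max_x + 1).toNat).map (pvEntry ds x n0 n))

lemma pvCnt_zero (ds : List Int) (x : Int) : pvCnt ds 0 x = 0 := by simp [pvCnt]

lemma pvCnt_succ (ds : List Int) (k : ℕ) (x : Int) :
    pvCnt ds (k + 1) x = pvCnt ds k x + (if x < ds.getD (k + 1) 0 then 1 else 0) := by
  simp [pvCnt, List.range_succ, List.countP_append]

-- normalising a unit-step range's upper bound through toNat (both sides nil when b ≤ a)
lemma pvRange_norm (a b : Int) :
    PySem.List.pyRange a b 1 = PySem.List.pyRange a (a + ((b - a).toNat : Int)) 1 := by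
  by_cases h : a ≤ b
  · have : a + ((b - a).toNat : Int) = b := by omega
    rw [this]
  · rw [PySem.List.pyRange_one_eq_nil (by omega), PySem.List.pyRange_one_eq_nil (by omega)]

lemma pvSet_map_range {α : Type} (f : ℕ → α) (M j : ℕ) (v : α) :
    ((List.range M).map f).set j v = (List.range M).map (fun i => if i = j then v else f i) := by
  apply List.ext_getElem
  · simp
  · intro i h1 h2
    simp only [List.getElem_set, List.getElem_map, List.getElem_range]
    split_ifs with hij hij' hij' <;> first | rfl | omega

lemma pvMap_range_congr {α : Type} (f g : ℕ → α) (M : ℕ) (h : ∀ i, i < M → f i = g i) :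
    (List.range M).map f = (List.range M).map g := by
  apply List.map_congr_left
  intro i hi
  exact h i (List.mem_range.mp hi)

lemma pvRow_zero (ds : List Int) (max_x : Int) :
    pvRow ds max_x 0 = List.replicate (max_x + 1).toNat 0 := by
  simp [pvRow, pvCnt_zero]

-- B's row step: the slice-concatenation applied to row (k) yields row (k+1)
lemma pvRowstep (f g : ℕ → Int) (M T : ℕ) (hT : 1 ≤ T)
    (hg : ∀ x, x < M → g x = if 1 ≤ x ∧ x < T then f x + 1 else f x) :
    ((List.range M).map f).take 1 ++ ((((List.range M).map f).drop 1).take (T - 1)).map (· + 1)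
      ++ ((List.range M).map f).drop T = (List.range M).map g := by
  apply List.ext_getElem
  · simp
    try omega
  · intro i h1 h2
    simp only [List.length_map, List.length_range] at h2
    simp only [List.getElem_append, List.length_append, List.length_take, List.length_drop,
      List.length_map, List.length_range, List.getElem_map, List.getElem_take, List.getElem_drop,
      List.getElem_range]
    rw [hg i h2]
    split_ifs <;> first | rfl | (congr 2 <;> omega)

-- the slice-concatenation of B's loop body maps row (k-1) to row k
lemma pvB_step (ds : List Int) (max_x : Int) (k : ℕ) (hk : 1 ≤ k) :
    PySem.List.slice (pvRow ds max_x (k - 1)) none (some 1)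
      ++ (PySem.List.slice (pvRow ds max_x (k - 1)) (some 1)
            (some (max 1 (min (PySem.List.pyGetD ds (k : Int) 0) (max_x + 1))))).map (· + 1)
      ++ PySem.List.slice (pvRow ds max_x (k - 1))
            (some (max 1 (min (PySem.List.pyGetD ds (k : Int) 0) (max_x + 1)))) none
    = pvRow ds max_x k := by
  rw [PySem.List.pyGetD_natCast]
  set t := max 1 (min (ds.getD k 0) (max_x + 1)) with ht
  have ht1 : (1 : Int) ≤ t := le_max_left _ _
  rw [PySem.List.slice_to _ (by omega), PySem.List.slice_toNat _ (by omega) (by omega),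
    PySem.List.slice_from _ (by omega)]
  simp only [Int.toNat_one]
  unfold pvRow
  apply pvRowstep _ _ _ t.toNat (by omega)
  intro c hc
  by_cases hc1 : 1 ≤ c
  · have hk1 : k - 1 + 1 = k := by omega
    have hsucc := pvCnt_succ ds (k - 1) (c : Int)
    rw [hk1] at hsucc
    rw [hsucc]
    have hcm : (c : Int) < max_x + 1 := by omega
    by_cases hlt : (c : Int) < ds.getD k 0
    · rw [if_pos hlt, if_pos (show 1 ≤ c ∧ c < t.toNat from ⟨hc1, by omega⟩)]
      simp [hc1]
    · rw [if_neg hlt, add_zero, if_neg (show ¬(1 ≤ c ∧ c < t.toNat) by omega)]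
  · simp [hc1]

-- B's loop invariant
lemma pvB_inv (ds : List Int) (max_x : Int) (n0 : ℕ) :
    (PySem.List.pyRange 0 (n0 : Int) 1).foldl
      (fun (st : List (List Int) × List Int) n =>
        let row := if n > 0 then
            let t := max 1 (min (PySem.List.pyGetD ds n 0) (max_x + 1))
            PySem.List.slice st.2 none (some 1)
              ++ (PySem.List.slice st.2 (some 1) (some t)).map (· + 1)
              ++ PySem.List.slice st.2 (some t) none
          else st.2
        (st.1 ++ [row], row))
      (([] : List (List Int)), List.replicate (max_x + 1).toNat (0 : Int))
    = ((List.range n0).map (pvRow ds max_x), pvRow ds max_x (n0 - 1)) := by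
  induction n0 with
  | zero =>
    rw [Nat.cast_zero, PySem.List.pyRange_one_eq_nil le_rfl]
    simp [pvRow_zero]
  | succ k ih =>
    rw [Nat.cast_add, Nat.cast_one, PySem.List.pyRange_one_succ_right (by positivity),
      List.foldl_append, ih, List.foldl_cons, List.foldl_nil]
    by_cases hk : 1 ≤ k
    · have hpos : ((k : Int) > 0) := by exact_mod_cast hk
      simp only [if_pos hpos]
      rw [pvB_step ds max_x k hk]
      rw [List.range_succ, List.map_append]
      simp
    · have hk0 : k = 0 := by omega
      subst hk0
      norm_num

lemma pvB_eq (limit max_x : Int) :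
    preprocess_special_numbers_alt limit max_x
      = (pvTblSpec (calculate_divisor_sums limit) limit max_x, calculate_divisor_sums limit) := by
  unfold preprocess_special_numbers_alt
  rw [pvRange_norm 0 (limit + 1)]
  simp only [zero_add, Int.sub_zero]
  rw [pvB_inv]
  rfl

-- A's inner loop invariant (column x, rows 1..n0)
lemma pvA_inner (ds : List Int) (limit max_x x : Int) (hx1 : 1 ≤ x) (hx2 : x ≤ max_x)
    (n0 : ℕ) (hn : n0 ≤ limit.toNat) :
    (PySem.List.pyRange 1 (1 + (n0 : Int)) 1).foldl
      (fun (st : Int × List (List Int)) n =>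
        (if PySem.List.pyGetD ds n 0 > x then st.1 + 1 else st.1,
          PySem.List.pySetD st.2 n
            (PySem.List.pySetD (PySem.List.pyGetD st.2 n []) x
              (if PySem.List.pyGetD ds n 0 > x then st.1 + 1 else st.1))))
      ((0 : Int), pvTblP ds limit max_x x 0)
    = (pvCnt ds n0 x, pvTblP ds limit max_x x n0) := by
  induction n0 with
  | zero =>
    rw [Nat.cast_zero, add_zero, PySem.List.pyRange_one_eq_nil le_rfl]
    simp [pvCnt_zero]
  | succ k ih =>
    have hk' : k ≤ limit.toNat := by omega
    simp only [Nat.cast_add, Nat.cast_one]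
    have h12 : (1 : Int) + ((k : Int) + 1) = (1 + (k : Int)) + 1 := by ring
    rw [h12, PySem.List.pyRange_one_succ_right (by omega), List.foldl_append, ih hk',
      List.foldl_cons, List.foldl_nil]
    have hcast : (1 : Int) + (k : Int) = ((k + 1 : ℕ) : Int) := by push_cast; ring
    rw [hcast, PySem.List.pyGetD_natCast, PySem.List.pyGetD_natCast, PySem.List.pySetD_natCast]
    have hcount : (if ds.getD (k + 1) 0 > x then pvCnt ds k x + 1 else pvCnt ds k x)
        = pvCnt ds (k + 1) x := by
      rw [pvCnt_succ]
      split_ifs with h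
      · rfl
      · rw [add_zero]
    rw [hcount]
    have hklt : k + 1 < (limit + 1).toNat := by omega
    have hrow : (pvTblP ds limit max_x x k).getD (k + 1) []
        = (List.range (max_x + 1).toNat).map (pvEntry ds x k (k + 1)) := by
      unfold pvTblP
      rw [List.getD_eq_getElem _ _ (by simpa using hklt)]
      simp
    rw [hrow, PySem.List.pySetD_of_nonneg _ _ (by omega : (0:Int) ≤ x), pvSet_map_range]
    have hxM : x.toNat < (max_x + 1).toNat := by omega
    have hnewrow : (List.range (max_x + 1).toNat).map
          (fun c => if c = x.toNat then pvCnt ds (k + 1) x else pvEntry ds x k (k + 1) c)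
        = (List.range (max_x + 1).toNat).map (pvEntry ds x (k + 1) (k + 1)) := by
      apply pvMap_range_congr
      intro c hc
      by_cases hcx : c = x.toNat
      · rw [if_pos hcx]
        unfold pvEntry
        rw [if_pos ⟨by omega, by omega, Or.inr ⟨by omega, le_rfl⟩⟩,
          show ((c : ℕ) : Int) = x by omega]
      · rw [if_neg hcx]
        unfold pvEntry
        exact if_congr (by omega) rfl rfl
    rw [hnewrow]
    unfold pvTblP
    rw [pvSet_map_range]
    congr 1
    apply pvMap_range_congr
    intro n' hn'
    by_cases hne : n' = k + 1
    · rw [if_pos hne, hne]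
    · rw [if_neg hne]
      apply pvMap_range_congr
      intro c hc
      unfold pvEntry
      exact if_congr (by omega) rfl rfl

lemma pvTblP_shift (ds : List Int) (limit max_x x : Int) :
    pvTblP ds limit max_x x limit.toNat = pvTblP ds limit max_x (x + 1) 0 := by
  unfold pvTblP
  apply pvMap_range_congr
  intro n hn
  apply pvMap_range_congr
  intro c hc
  unfold pvEntry
  have hnl : n ≤ limit.toNat := by omega
  by_cases h1 : 1 ≤ n <;> by_cases h2 : 1 ≤ c
  · by_cases h3 : (c : Int) ≤ x
    · rw [if_pos ⟨h1, h2, by omega⟩, if_pos ⟨h1, h2, by omega⟩]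
    · rw [if_neg (by push Not; intro _ _; omega), if_neg (by push Not; intro _ _; omega)]
  all_goals simp_all

-- A's outer loop invariant (columns 1..k0 finished)
lemma pvA_outer (ds : List Int) (limit max_x : Int) (k0 : ℕ) (hk : k0 ≤ max_x.toNat) :
    (PySem.List.pyRange 1 (1 + (k0 : Int)) 1).foldl
      (fun sc x =>
        ((PySem.List.pyRange 1 (1 + (limit.toNat : Int)) 1).foldl (fun (st : Int × List (List Int)) n =>
            (if PySem.List.pyGetD ds n 0 > x then st.1 + 1 else st.1,
              PySem.List.pySetD st.2 n
                (PySem.List.pySetD (PySem.List.pyGetD st.2 n []) x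
                  (if PySem.List.pyGetD ds n 0 > x then st.1 + 1 else st.1))))
          ((0 : Int), sc)).2)
      (pvTblP ds limit max_x 1 0)
    = pvTblP ds limit max_x (1 + (k0 : Int)) 0 := by
  induction k0 with
  | zero =>
    rw [Nat.cast_zero, add_zero, PySem.List.pyRange_one_eq_nil le_rfl]
    rfl
  | succ k ih =>
    have hk' : k ≤ max_x.toNat := by omega
    simp only [Nat.cast_add, Nat.cast_one]
    have h12 : (1 : Int) + ((k : Int) + 1) = (1 + (k : Int)) + 1 := by ring
    rw [h12, PySem.List.pyRange_one_succ_right (by omega), List.foldl_append, ih hk',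
      List.foldl_cons, List.foldl_nil]
    rw [pvA_inner ds limit max_x (1 + (k : Int)) (by omega) (by omega) limit.toNat le_rfl]
    exact pvTblP_shift ds limit max_x (1 + (k : Int))

lemma pvTblP_init (ds : List Int) (limit max_x : Int) :
    List.replicate (limit + 1).toNat (List.replicate (max_x + 1).toNat (0 : Int))
      = pvTblP ds limit max_x 1 0 := by
  unfold pvTblP
  apply List.ext_getElem
  · simp
  · intro i h1 h2
    simp only [List.getElem_replicate, List.getElem_map, List.getElem_range]
    apply List.ext_getElem
    · simp
    · intro j j1 j2
      simp only [List.getElem_replicate, List.getElem_map, List.getElem_range, pvEntry]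
      rw [if_neg]
      omega

lemma pvTblP_final (ds : List Int) (limit max_x : Int) :
    pvTblP ds limit max_x (1 + (max_x.toNat : Int)) 0 = pvTblSpec ds limit max_x := by
  unfold pvTblP pvTblSpec pvRow
  apply pvMap_range_congr
  intro n hn
  apply pvMap_range_congr
  intro c hc
  unfold pvEntry
  have hcm : (c : Int) < 1 + (max_x.toNat : Int) := by omega
  by_cases h1 : 1 ≤ n <;> by_cases h2 : 1 ≤ c
  · rw [if_pos ⟨h1, h2, Or.inl hcm⟩, if_pos h2]
  · rw [if_neg (by omega), if_neg (by omega)]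
  · rw [if_neg (by omega), if_pos h2]
    have hn0 : n = 0 := by omega
    rw [hn0, pvCnt_zero]
  · rw [if_neg (by omega), if_neg (by omega)]

lemma pvA_eq (limit max_x : Int) :
    preprocess_special_numbers limit max_x
      = (pvTblSpec (calculate_divisor_sums limit) limit max_x, calculate_divisor_sums limit) := by
  unfold preprocess_special_numbers
  rw [pvRange_norm 1 (max_x + 1), pvRange_norm 1 (limit + 1)]
  simp only [add_sub_cancel_right]
  rw [pvTblP_init (calculate_divisor_sums limit) limit max_x,
    pvA_outer (calculate_divisor_sums limit) limit max_x max_x.toNat le_rfl,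
    pvTblP_final]

-- ===== VERDICT (by name: the statement is the Claim_ definition above) =====
theorem preprocess_special_numbers_spec : Claim_equal_preprocess_special_numbers := by
  intro limit max_x _
  unfold Spec_preprocess_special_numbers
  rw [pvA_eq, pvB_eq]
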